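-- pv_equiv track=rewrite | github.com/emohebi/pdf-to-json-pipeline | src/agents/description_reconciler.py | _split_by_cooccurrence
-- ===== SOURCE A (Python) =====
-- from typing import Any, Dict, List, Optional, Set, Tuple
--
-- def _split_by_cooccurrence(
--     members: List[str],
--     desc_contracts: Dict[str, Set[str]],
-- ) -> List[List[str]]:
--     """Split a group so no two members co-occur in the same contract."""
--     sub_groups: List[List[str]] = []
--     for member in members:
--         member_contracts = desc_contracts.get(member, set())
--         placed = False
--         for group in sub_groups:
--             conflict = False
--             for existing in group:
--                 if member_contracts & desc_contracts.get(existing, set()):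
--                     conflict = True
--                     break
--             if not conflict:
--                 group.append(member)
--                 placed = True
--                 break
--         if not placed:
--             sub_groups.append([member])
--     return sub_groups
-- ===== SOURCE B (Python) =====
-- from typing import Dict, List, Set
--
--
-- def _split_by_cooccurrence(
--     members: List[str],
--     desc_contracts: Dict[str, Set[str]],
-- ) -> List[List[str]]:
--     """Split a group so no two members co-occur in the same contract.
--
--     Inverted-index algorithm: maintains owners[contract] = set of group
--     indices whose members mention that contract, so a member's conflicting
--     groups are read off directly and no per-group (or per-member) contract
--     intersection is ever computed.
--     """
--     groups: List[List[str]] = []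
--     owners: Dict[str, Set[int]] = {}
--     for member in members:
--         mc = desc_contracts.get(member, set())
--         blocked: Set[int] = set()
--         for c in mc:
--             blocked |= owners.get(c, set())
--         idx = next((i for i in range(len(groups)) if i not in blocked), None)
--         if idx is None:
--             idx = len(groups)
--             groups.append([member])
--         else:
--             groups[idx].append(member)
--         for c in mc:
--             owners.setdefault(c, set()).add(idx)
--     return groups
-- ===== Notes on version B (the rewrite author's own statement) =====
-- stated objective: faster
-- what changed: B replaces A's per-group per-member contract-intersection scans with an inverted index owners[contract] -> group indices: each member's blocked group set is the union of the owner sets of its contracts, and the member goes to the first unblocked index.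
import Mathlib
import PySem

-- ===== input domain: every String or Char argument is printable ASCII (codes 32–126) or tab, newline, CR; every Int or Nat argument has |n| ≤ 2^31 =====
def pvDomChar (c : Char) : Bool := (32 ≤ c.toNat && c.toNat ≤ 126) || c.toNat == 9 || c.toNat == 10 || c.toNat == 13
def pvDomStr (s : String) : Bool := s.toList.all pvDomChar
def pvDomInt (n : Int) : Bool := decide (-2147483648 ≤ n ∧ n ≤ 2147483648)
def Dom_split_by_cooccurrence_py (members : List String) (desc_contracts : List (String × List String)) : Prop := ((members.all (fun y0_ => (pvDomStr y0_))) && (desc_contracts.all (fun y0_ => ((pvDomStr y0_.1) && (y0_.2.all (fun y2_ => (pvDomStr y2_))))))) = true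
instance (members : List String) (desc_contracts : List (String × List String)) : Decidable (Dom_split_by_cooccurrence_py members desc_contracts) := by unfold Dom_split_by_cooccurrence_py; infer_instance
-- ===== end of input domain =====

-- B replaces A's per-group per-member intersection scans by an inverted index
-- contract -> group indices: a member's blocked groups are read off directly
-- and it joins the first unblocked index (objective: faster).

-- ===== PORT A =====
-- desc_contracts.get(k, set()) (dict lookup with default empty set)
def sbcGetD (d : List (String × List String)) (k : String) : List String :=
  PySem.Dict.getD (PySem.Dict.mk d) k []

-- bool(xs & ys) for Python sets: nonempty intersection
def sbcHasCommon (xs ys : List String) : Bool := xs.any (fun c => ys.contains c)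

-- A's inner 'for existing in group' conflict scan (with its early break)
def sbcConflict (d : List (String × List String)) (mc : List String) (g : List String) : Bool :=
  g.any (fun ex => sbcHasCommon mc (sbcGetD d ex))

-- A's 'for group in sub_groups' placement loop: some = groups after placing, none = not placed
def sbcPlaceA (d : List (String × List String)) (mc : List String) (member : String) :
    List (List String) → Option (List (List String))
  | [] => none
  | g :: rest =>
    if sbcConflict d mc g then
      (sbcPlaceA d mc member rest).map (g :: ·)
    else
      some ((g ++ [member]) :: rest)

def split_by_cooccurrence_py (members : List String) (desc_contracts : List (String × List String)) : List (List String) :=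
  members.foldl (fun sub_groups member =>
    let member_contracts := sbcGetD desc_contracts member
    match sbcPlaceA desc_contracts member_contracts member sub_groups with
    | some sub_groups' => sub_groups'
    | none => sub_groups ++ [[member]]) []

-- ===== PORT B =====
-- one step of B: owners maps each contract to the set of indices of groups using it;
-- blocked = union of owners over the member's contracts; join the first index not blocked
def sbcStepB (d : List (String × List String))
    (st : List (List String) × PySem.Dict String (List Int)) (member : String) :
    List (List String) × PySem.Dict String (List Int) :=
  let mc := sbcGetD d member
  let blocked : PySem.Set Int :=
    mc.foldl (fun b c => PySem.Set.update b (PySem.Dict.getD st.2 c [])) PySem.Set.empty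
  match (PySem.List.pyRange 0 (st.1.length : Int) 1).find?
          (fun i => !(PySem.Set.contains blocked i)) with
  | some i =>
      (st.1.modify i.toNat (fun g => g ++ [member]),
       mc.foldl (fun o c => PySem.Dict.modify o c [] (fun s => PySem.Set.add s i)) st.2)
  | none =>
      (st.1 ++ [[member]],
       mc.foldl (fun o c => PySem.Dict.modify o c [] (fun s => PySem.Set.add s (st.1.length : Int))) st.2)

def split_by_cooccurrence_py_alt (members : List String) (desc_contracts : List (String × List String)) : List (List String) :=
  (members.foldl (sbcStepB desc_contracts) ([], PySem.Dict.empty)).1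

-- ===== PRECONDITION & SPEC =====
def Spec_split_by_cooccurrence_py (members : List String) (desc_contracts : List (String × List String)) (out : List (List String)) : Prop := out = split_by_cooccurrence_py_alt members desc_contracts
instance (members : List String) (desc_contracts : List (String × List String)) (out : List (List String)) : Decidable (Spec_split_by_cooccurrence_py members desc_contracts out) := by unfold Spec_split_by_cooccurrence_py; infer_instance

-- ===== CLAIM (what is proved, stated in full; the proofs are below) =====
def Claim_equal_split_by_cooccurrence_py : Prop := ∀ (members : List String) (desc_contracts : List (String × List String)), Dom_split_by_cooccurrence_py members desc_contracts → Spec_split_by_cooccurrence_py members desc_contracts (split_by_cooccurrence_py members desc_contracts)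

-- ===== LEMMAS AND PROOFS =====

-- Invariant: owners[c] holds exactly the indices of the groups owning contract c
def sbcInv (d : List (String × List String)) (gs : List (List String))
    (o : PySem.Dict String (List Int)) : Prop :=
  ∀ (c : String) (i : Int),
    i ∈ PySem.Dict.getD o c [] ↔
      ∃ (j : Nat) (_ : j < gs.length), i = (j : Int) ∧ ∃ ex ∈ gs[j], c ∈ sbcGetD d ex

theorem sbc_mem_blocked (o : PySem.Dict String (List Int)) (i : Int) :
    ∀ (mc : List String) (b : PySem.Set Int),
      (i ∈ mc.foldl (fun b c => PySem.Set.update b (PySem.Dict.getD o c [])) b) ↔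
        i ∈ b ∨ ∃ c ∈ mc, i ∈ PySem.Dict.getD o c []
  | [], b => by simp
  | c :: mc, b => by
    rw [List.foldl_cons, sbc_mem_blocked o i mc, PySem.Set.mem_update]
    simp only [List.exists_mem_cons_iff]
    tauto

theorem sbc_getD_foldl_add (i0 : Int) (c : String) (i : Int) :
    ∀ (mc : List String) (o : PySem.Dict String (List Int)),
      (i ∈ PySem.Dict.getD (mc.foldl (fun o c => PySem.Dict.modify o c [] (fun s => PySem.Set.add s i0)) o) c []) ↔
        i ∈ PySem.Dict.getD o c [] ∨ (c ∈ mc ∧ i = i0)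
  | [], o => by simp
  | c' :: mc, o => by
    rw [List.foldl_cons, sbc_getD_foldl_add i0 c i mc, PySem.Dict.getD_modify]
    by_cases hc : c = c'
    · subst hc
      rw [if_pos rfl]
      simp only [PySem.Set.mem_add, List.mem_cons, true_or, true_and]
      tauto
    · rw [if_neg hc]
      simp only [List.mem_cons]
      tauto

theorem sbc_blocked_eq_conflict (d : List (String × List String))
    (gs : List (List String)) (o : PySem.Dict String (List Int))
    (hinv : sbcInv d gs o) (mc : List String) (j : Nat) (hj : j < gs.length) :
    PySem.Set.contains
        (mc.foldl (fun b c => PySem.Set.update b (PySem.Dict.getD o c [])) PySem.Set.empty)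
        (j : Int)
      = sbcConflict d mc gs[j] := by
  rw [Bool.eq_iff_iff, PySem.Set.contains_iff, sbc_mem_blocked]
  simp only [sbcConflict, sbcHasCommon, List.any_eq_true, List.contains_iff_mem]
  constructor
  · rintro (h | ⟨c, hc, hm⟩)
    · exact absurd h (by simp [PySem.Set.empty])
    · obtain ⟨j', hj', hji, ex, hex, hcex⟩ := (hinv c _).1 hm
      have hjj : j' = j := by exact_mod_cast hji.symm
      subst hjj
      exact ⟨ex, hex, c, hc, hcex⟩
  · rintro ⟨ex, hex, c, hc, hcex⟩
    exact Or.inr ⟨c, hc, (hinv c _).2 ⟨j, hj, rfl, ex, hex, hcex⟩⟩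

theorem sbc_placeA_eq_find (d : List (String × List String)) (mc : List String) (m : String) :
    ∀ (gs : List (List String)) (P : Int → Bool) (a : Int), 0 ≤ a →
      (∀ (j : Nat), j < gs.length → ∀ (hj : j < gs.length), P (a + (j : Int)) = sbcConflict d mc gs[j]) →
      sbcPlaceA d mc m gs =
        ((PySem.List.pyRange a (a + (gs.length : Int)) 1).find? (fun i => !(P i))).map
          (fun i => gs.modify (i - a).toNat (fun g => g ++ [m]))
  | [], P, a, ha, hP => by
    simp [PySem.List.pyRange_one_eq_nil (le_refl a), sbcPlaceA]
  | g :: rest, P, a, ha, hP => by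
    have hlt : a < a + ((g :: rest).length : Int) := by
      push_cast [List.length_cons]; omega
    rw [PySem.List.pyRange_one_cons hlt]
    have h0 : P a = sbcConflict d mc g := by
      have := hP 0 (by simp) (by simp)
      simpa using this
    by_cases hcf : sbcConflict d mc g = true
    · rw [List.find?_cons_of_neg (p := fun i => !(P i)) (by simp [h0, hcf])]
      have hA : sbcPlaceA d mc m (g :: rest) = (sbcPlaceA d mc m rest).map (g :: ·) := by
        simp [sbcPlaceA, hcf]
      have hend : a + (((g :: rest).length : Nat) : Int) = (a + 1) + (rest.length : Int) := by
        push_cast [List.length_cons]; ring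
      rw [hA, hend]
      rw [sbc_placeA_eq_find d mc m rest P (a + 1) (by omega)
        (by
          intro j hjl hj
          have := hP (j + 1) (by simpa using Nat.succ_lt_succ hjl)
            (by simpa using Nat.succ_lt_succ hjl)
          have harith : a + ((j : Int) + 1) = a + 1 + (j : Int) := by ring
          simpa [Nat.cast_add, Nat.cast_one, harith, List.getElem_cons_succ] using this)]
      cases hfind : (PySem.List.pyRange (a + 1) (a + 1 + (rest.length : Int)) 1).find? (fun i => !(P i)) with
      | none => simp
      | some i =>
        have hi := List.mem_of_find?_eq_some hfind
        have hia : a + 1 ≤ i := (PySem.List.mem_pyRange_one.1 hi).1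
        simp only [Option.map_some]
        have hnat : (i - a).toNat = (i - (a + 1)).toNat + 1 := by omega
        rw [hnat]
        rfl
    · rw [List.find?_cons_of_pos (p := fun i => !(P i)) (by simp [h0, hcf])]
      have hA : sbcPlaceA d mc m (g :: rest) = some ((g ++ [m]) :: rest) := by
        simp [sbcPlaceA, hcf]
      rw [hA]
      simp only [Option.map_some]
      have hz : (a - a).toNat = 0 := by omega
      rw [hz]
      rfl

theorem sbc_step_eq (d : List (String × List String)) (m : String)
    (gs : List (List String)) (o : PySem.Dict String (List Int)) (hinv : sbcInv d gs o) :
    (match sbcPlaceA d (sbcGetD d m) m gs with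
      | some gs' => gs'
      | none => gs ++ [[m]]) = (sbcStepB d (gs, o) m).1
    ∧ sbcInv d (sbcStepB d (gs, o) m).1 (sbcStepB d (gs, o) m).2 := by
  have hplace := sbc_placeA_eq_find d (sbcGetD d m) m gs
    (PySem.Set.contains
      ((sbcGetD d m).foldl (fun b c => PySem.Set.update b (PySem.Dict.getD o c [])) PySem.Set.empty))
    0 (le_refl 0)
    (by
      intro j hjl hj
      have := sbc_blocked_eq_conflict d gs o hinv (sbcGetD d m) j hjl
      simpa using this)
  simp only [zero_add, sub_zero] at hplace
  simp only [sbcStepB]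
  cases hfind : (PySem.List.pyRange 0 ((gs.length : Nat) : Int) 1).find?
      (fun i => !(PySem.Set.contains
        ((sbcGetD d m).foldl (fun b c => PySem.Set.update b (PySem.Dict.getD o c [])) PySem.Set.empty) i)) with
  | none =>
    rw [hfind] at hplace
    simp only [Option.map_none] at hplace
    constructor
    · rw [hplace]
    · intro c i
      rw [sbc_getD_foldl_add, hinv c i]
      constructor
      · rintro (⟨j, hj, rfl, ex, hex, hcex⟩ | ⟨hcm, rfl⟩)
        · refine ⟨j, by simp; omega, rfl, ex, ?_, hcex⟩
          rw [List.getElem_append_left hj]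
          exact hex
        · refine ⟨gs.length, by simp, rfl, m, ?_, hcm⟩
          rw [List.getElem_append_right (le_refl _)]
          simp
      · rintro ⟨j, hj, rfl, ex, hex, hcex⟩
        by_cases hjl : j < gs.length
        · rw [List.getElem_append_left hjl] at hex
          exact Or.inl ⟨j, hjl, rfl, ex, hex, hcex⟩
        · have hje : j = gs.length := by simp at hj; omega
          subst hje
          rw [List.getElem_append_right (le_refl _)] at hex
          simp at hex
          subst hex
          exact Or.inr ⟨hcex, rfl⟩
  | some i =>
    rw [hfind] at hplace
    simp only [Option.map_some] at hplace
    have hi := List.mem_of_find?_eq_some hfind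
    have hib := PySem.List.mem_pyRange_one.1 hi
    have hi0 : 0 ≤ i := hib.1
    have hilen : i < (gs.length : Int) := hib.2
    have hitn : i.toNat < gs.length := by omega
    constructor
    · rw [hplace]
    · intro c i'
      rw [sbc_getD_foldl_add, hinv c i']
      constructor
      · rintro (⟨j, hj, rfl, ex, hex, hcex⟩ | ⟨hcm, hei⟩)
        · refine ⟨j, by simpa using hj, rfl, ex, ?_, hcex⟩
          rw [List.getElem_modify]
          split
          · next heq => subst heq; exact List.mem_append_left _ hex
          · exact hex
        · refine ⟨i.toNat, by simpa using hitn, by omega, m, ?_, hcm⟩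
          rw [List.getElem_modify, if_pos rfl]
          exact List.mem_append_right _ (by simp)
      · rintro ⟨j, hj, rfl, ex, hex, hcex⟩
        have hjl : j < gs.length := by simpa using hj
        rw [List.getElem_modify] at hex
        by_cases hji : i.toNat = j
        · rw [if_pos hji] at hex
          rcases List.mem_append.1 hex with hex | hex
          · subst hji
            exact Or.inl ⟨i.toNat, hitn, rfl, ex, hex, hcex⟩
          · simp at hex
            subst hex
            exact Or.inr ⟨hcex, by omega⟩
        · rw [if_neg hji] at hex
          exact Or.inl ⟨j, hjl, rfl, ex, hex, hcex⟩

theorem sbc_fold_eq (d : List (String × List String)) :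
    ∀ (ms : List String) (gs : List (List String)) (o : PySem.Dict String (List Int)),
      sbcInv d gs o →
      ms.foldl (fun sub_groups member =>
        let member_contracts := sbcGetD d member
        match sbcPlaceA d member_contracts member sub_groups with
        | some sub_groups' => sub_groups'
        | none => sub_groups ++ [[member]]) gs
      = (ms.foldl (sbcStepB d) (gs, o)).1
  | [], gs, o, _ => rfl
  | m :: ms, gs, o, hinv => by
    obtain ⟨h1, h2⟩ := sbc_step_eq d m gs o hinv
    rw [List.foldl_cons, List.foldl_cons]
    rw [show (let member_contracts := sbcGetD d m
              match sbcPlaceA d member_contracts m gs with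
              | some sub_groups' => sub_groups'
              | none => gs ++ [[m]]) = (sbcStepB d (gs, o) m).1 from h1]
    exact sbc_fold_eq d ms (sbcStepB d (gs, o) m).1 (sbcStepB d (gs, o) m).2 h2

-- ===== VERDICT (by name: the statement is the Claim_ definition above) =====
theorem split_by_cooccurrence_py_spec : Claim_equal_split_by_cooccurrence_py := by
  intro members d _
  show split_by_cooccurrence_py members d = split_by_cooccurrence_py_alt members d
  have hinv0 : sbcInv d [] PySem.Dict.empty := by
    intro c i
    simp [PySem.Dict.getD_empty]
  simpa [split_by_cooccurrence_py, split_by_cooccurrence_py_alt] using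
    sbc_fold_eq d members [] PySem.Dict.empty hinv0
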